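-- pv_equiv track=rewrite | github.com/DevOpsMadDog/Fixops | scripts/api_contract_check.py | find_matching_endpoint
-- ===== SOURCE A (Python) =====
-- def normalize_path(path: str) -> str:
--     """Normalize path for comparison, stripping query params."""
--     # Remove query string if present
--     if "?" in path:
--         path = path.split("?")[0]
--     return path.strip()
--
-- def path_matches(spec_path: str, openapi_path: str) -> bool:
--     """Check if a spec path matches an OpenAPI path, handling path parameters."""
--     # Convert path parameters to regex pattern
--     # {param} in both -> match
--     spec_parts = spec_path.split("/")
--     openapi_parts = openapi_path.split("/")
--
--     if len(spec_parts) != len(openapi_parts):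
--         return False
--
--     for spec_part, openapi_part in zip(spec_parts, openapi_parts):
--         # Both are parameters (e.g., {id} and {findingId})
--         if spec_part.startswith("{") and openapi_part.startswith("{"):
--             continue
--         # Exact match
--         if spec_part == openapi_part:
--             continue
--         # No match
--         return False
--
--     return True
--
-- def find_matching_endpoint(
--     method: str, path: str, openapi_endpoints: set[tuple[str, str]]
-- ) -> bool:
--     """Check if an endpoint exists in OpenAPI, handling path parameter variations."""
--     # Normalize path (strip query params)
--     normalized_path = normalize_path(path)
--
--     # First try exact match
--     if (method, normalized_path) in openapi_endpoints:
--         return True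
--
--     # Try matching with path parameter variations
--     for openapi_method, openapi_path in openapi_endpoints:
--         if method == openapi_method and path_matches(normalized_path, openapi_path):
--             return True
--
--     return False
-- ===== SOURCE B (Python) =====
-- def _canon(p):
--     # tuple of '/'-segments, parameter segments (starting with '{') replaced by None
--     return tuple(None if seg.startswith("{") else seg for seg in p.split("/"))
--
-- def find_matching_endpoint(method, path, openapi_endpoints):
--     """Check if an endpoint exists in OpenAPI, handling path parameter variations."""
--     query = _canon(path.split("?")[0].strip())
--     templates = {_canon(p) for m, p in openapi_endpoints if m == method}
--     return query in templates
-- ===== Notes on version B (the rewrite author's own statement) =====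
-- stated objective: faster
-- what changed: Replaces the exact-lookup-plus-per-candidate segment-comparison scan with a canonicalization (segments, '{'-parameters mapped to a None sentinel) indexed into a set built once, followed by a single membership test.
import Mathlib
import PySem

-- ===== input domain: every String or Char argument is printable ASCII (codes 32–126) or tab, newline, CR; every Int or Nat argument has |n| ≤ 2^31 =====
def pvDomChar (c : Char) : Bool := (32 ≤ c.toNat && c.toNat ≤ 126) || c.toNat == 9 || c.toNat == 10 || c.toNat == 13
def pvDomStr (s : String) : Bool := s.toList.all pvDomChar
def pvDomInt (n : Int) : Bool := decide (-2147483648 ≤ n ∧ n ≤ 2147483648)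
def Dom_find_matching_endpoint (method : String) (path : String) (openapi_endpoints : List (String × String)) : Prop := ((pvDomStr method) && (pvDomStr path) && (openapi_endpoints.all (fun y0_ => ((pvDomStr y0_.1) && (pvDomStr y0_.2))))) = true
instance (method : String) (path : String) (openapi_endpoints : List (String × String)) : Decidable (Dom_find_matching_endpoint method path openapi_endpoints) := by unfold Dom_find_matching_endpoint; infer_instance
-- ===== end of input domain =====

-- B replaces A's exact-lookup plus per-candidate segment-comparison scan by canonicalizing paths
-- ('{'-parameter segments → none sentinel) into a set built once, then a single membership test (objective: alternative).

-- ===== PORT A =====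
-- Python s.split(sep) for a nonempty literal sep (split? is `some` exactly when sep ≠ "")
def pySplit (s sep : String) : List String := (PySem.Str.split? s sep).getD []

-- normalize_path: the [0] index of split (a split result is never empty, so headD's default is unreachable)
def normalize_path (path : String) : String :=
  let path1 := if PySem.Str.isIn "?" path then (pySplit path "?").headD "" else path
  PySem.Str.strip path1

-- the `for spec_part, openapi_part in zip(...)` loop of path_matches
def pmLoop : List (String × String) → Bool
  | [] => true
  | (sp, op) :: rest =>
    if PySem.Str.startswith sp "{" && PySem.Str.startswith op "{" then pmLoop rest
    else if sp == op then pmLoop rest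
    else false

def path_matches (spec_path openapi_path : String) : Bool :=
  let spec_parts := pySplit spec_path "/"
  let openapi_parts := pySplit openapi_path "/"
  if spec_parts.length ≠ openapi_parts.length then false
  else pmLoop (spec_parts.zip openapi_parts)

-- the `for openapi_method, openapi_path in openapi_endpoints` loop
def fmeLoop (method np : String) : List (String × String) → Bool
  | [] => false
  | (om, op) :: rest =>
    if method == om && path_matches np op then true else fmeLoop method np rest

def find_matching_endpoint (method : String) (path : String) (openapi_endpoints : List (String × String)) : Bool :=
  let normalized_path := normalize_path path
  if openapi_endpoints.contains (method, normalized_path) then true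
  else fmeLoop method normalized_path openapi_endpoints

-- ===== PORT B =====
def canonSeg (seg : String) : Option String :=
  if PySem.Str.startswith seg "{" then none else some seg

def canon (p : String) : List (Option String) := (pySplit p "/").map canonSeg

def find_matching_endpoint_alt (method : String) (path : String) (openapi_endpoints : List (String × String)) : Bool :=
  let query := canon (PySem.Str.strip ((pySplit path "?").headD ""))
  let templates : PySem.Set (List (Option String)) :=
    PySem.Set.ofList ((openapi_endpoints.filter (fun e => e.1 == method)).map (fun e => canon e.2))
  PySem.Set.contains templates query

-- ===== PRECONDITION & SPEC =====
def Spec_find_matching_endpoint (method : String) (path : String) (openapi_endpoints : List (String × String)) (out : Bool) : Prop := out = find_matching_endpoint_alt method path openapi_endpoints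
instance (method : String) (path : String) (openapi_endpoints : List (String × String)) (out : Bool) : Decidable (Spec_find_matching_endpoint method path openapi_endpoints out) := by unfold Spec_find_matching_endpoint; infer_instance

-- ===== CLAIM (what is proved, stated in full; the proofs are below) =====
def Claim_equal_find_matching_endpoint : Prop := ∀ (method : String) (path : String) (openapi_endpoints : List (String × String)), Dom_find_matching_endpoint method path openapi_endpoints → Spec_find_matching_endpoint method path openapi_endpoints (find_matching_endpoint method path openapi_endpoints)

-- ===== LEMMAS AND PROOFS =====

-- splitOn's worker leaves the input whole when the separator occurs nowhere in it
theorem pvGoNoOcc (sep : List Char) : ∀ (fuel : Nat) (l cur : List Char) (acc : List (List Char)),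
    l.length < fuel → ¬ sep <:+: l →
    PySem.Chars.splitOn.go sep fuel l cur acc = ((cur.reverse ++ l) :: acc).reverse := by
  intro fuel
  induction fuel with
  | zero => intro l cur acc h _; omega
  | succ n ih =>
    intro l cur acc hlen hocc
    cases l with
    | nil => simp [PySem.Chars.splitOn.go]
    | cons c rest =>
      have hpre : sep.isPrefixOf (c :: rest) = false := by
        cases hp : sep.isPrefixOf (c :: rest) with
        | false => rfl
        | true =>
          exact absurd ((List.isPrefixOf_iff_prefix.mp hp).isInfix) hocc
      have hocc' : ¬ sep <:+: rest :=
        fun h => hocc (h.trans (List.suffix_cons c rest).isInfix)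
      have hlen' : rest.length < n := by simpa using hlen
      simp only [PySem.Chars.splitOn.go, hpre, Bool.false_eq_true, if_false,
        ih rest (c :: cur) acc hlen' hocc']
      simp

theorem pvSplitOnNoOcc (s sep : List Char) (h : ¬ sep <:+: s) :
    PySem.Chars.splitOn s sep = [s] := by
  unfold PySem.Chars.splitOn
  rw [pvGoNoOcc sep (s.length + 1) s [] [] (by omega) h]
  simp

theorem pvSplitQ (path : String) (h : PySem.Str.isIn "?" path = false) :
    pySplit path "?" = [path] := by
  have h' : ¬ ("?".toList <:+: path.toList) := by
    rw [PySem.Str.isIn_eq] at h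
    exact (PySem.Chars.isIn_eq_false_iff _ _).mp h
  have hq : ("?".toList : List Char) = ['?'] := by decide
  rw [hq] at h'
  unfold pySplit
  simp [PySem.Str.split?, PySem.Chars.split?, pvSplitOnNoOcc path.toList ['?'] h']

theorem pvNormEq (path : String) :
    PySem.Str.strip ((pySplit path "?").headD "") = normalize_path path := by
  unfold normalize_path
  by_cases h : PySem.Str.isIn "?" path = true
  · simp only [h, if_true]
  · have h' : PySem.Str.isIn "?" path = false := by simpa using h
    rw [pvSplitQ path h']
    simp only [h', Bool.false_eq_true, if_false]
    rfl

theorem pvPmLoopIff : ∀ (xs ys : List String), xs.length = ys.length →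
    (pmLoop (xs.zip ys) = true ↔ xs.map canonSeg = ys.map canonSeg) := by
  intro xs
  induction xs with
  | nil =>
    intro ys h
    cases ys with
    | nil => simp [pmLoop]
    | cons o ys => simp at h
  | cons s xs ih =>
    intro ys h
    cases ys with
    | nil => simp at h
    | cons o ys =>
      have hlen : xs.length = ys.length := by simpa using h
      by_cases hs : PySem.Chars.startswith s.toList ['{'] = true <;>
        by_cases ho : PySem.Chars.startswith o.toList ['{'] = true
      · simp [pmLoop, canonSeg, hs, ho, ih ys hlen]
      · have hne : s ≠ o := fun e => ho (e ▸ hs)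
        simp [pmLoop, canonSeg, hs, ho, hne]
      · have hne : s ≠ o := fun e => hs (e ▸ ho)
        simp [pmLoop, canonSeg, hs, ho, hne]
      · by_cases he : s = o
        · subst he; simp [pmLoop, canonSeg, hs, ih ys hlen]
        · simp [pmLoop, canonSeg, hs, ho, he]

theorem pvPathMatchesIff (a b : String) : path_matches a b = true ↔ canon a = canon b := by
  unfold path_matches canon
  by_cases hl : (pySplit a "/").length = (pySplit b "/").length
  · simp only [hl, ne_eq, not_true_eq_false, if_false]
    exact pvPmLoopIff _ _ hl
  · simp only [ne_eq, hl, not_false_eq_true, if_true, Bool.false_eq_true, false_iff]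
    intro e
    exact hl (by simpa using congrArg List.length e)

theorem pvFmeEqAny (method np : String) : ∀ (eps : List (String × String)),
    fmeLoop method np eps = eps.any (fun e => method == e.1 && path_matches np e.2)
  | [] => rfl
  | (om, op) :: rest => by
    cases h : (method == om && path_matches np op) <;>
      simp [fmeLoop, h, pvFmeEqAny method np rest]

theorem pvFmeLoopIff (method np : String) (eps : List (String × String)) :
    fmeLoop method np eps = true ↔ ∃ e ∈ eps, method = e.1 ∧ path_matches np e.2 = true := by
  rw [pvFmeEqAny]
  simp only [List.any_eq_true, Bool.and_eq_true, beq_iff_eq]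

theorem pvAltIff (method path : String) (eps : List (String × String)) :
    find_matching_endpoint_alt method path eps = true ↔
      ∃ e ∈ eps, e.1 = method ∧ canon e.2 = canon (normalize_path path) := by
  simp only [find_matching_endpoint_alt, PySem.Set.contains]
  rw [List.contains_iff_mem, PySem.Set.mem_ofList]
  simp only [List.mem_map, List.mem_filter, beq_iff_eq]
  rw [pvNormEq]
  constructor
  · rintro ⟨e, ⟨he, hm⟩, hc⟩
    exact ⟨e, he, hm, hc⟩
  · rintro ⟨e, he, hm, hc⟩
    exact ⟨e, ⟨he, hm⟩, hc⟩

theorem pvAIff (method path : String) (eps : List (String × String)) :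
    find_matching_endpoint method path eps = true ↔
      ∃ e ∈ eps, e.1 = method ∧ canon e.2 = canon (normalize_path path) := by
  simp only [find_matching_endpoint]
  by_cases hc : eps.contains (method, normalize_path path) = true
  · simp only [hc, if_true, true_iff]
    exact ⟨(method, normalize_path path), List.contains_iff_mem.mp hc, rfl, rfl⟩
  · have hc' : eps.contains (method, normalize_path path) = false := by simpa using hc
    simp only [hc', Bool.false_eq_true, if_false, pvFmeLoopIff]
    constructor
    · rintro ⟨e, he, hm, hp⟩
      exact ⟨e, he, hm.symm, ((pvPathMatchesIff _ _).mp hp).symm⟩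
    · rintro ⟨e, he, hm, hp⟩
      exact ⟨e, he, hm.symm, (pvPathMatchesIff _ _).mpr hp.symm⟩

-- ===== VERDICT (by name: the statement is the Claim_ definition above) =====
theorem find_matching_endpoint_spec : Claim_equal_find_matching_endpoint := by
  intro method path eps _
  unfold Spec_find_matching_endpoint
  rw [Bool.eq_iff_iff, pvAIff, pvAltIff]
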